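-- pv_equiv track=rewrite | github.com/jcpinto54/FEUP-IART | TP1/src/utils.py | orderRouters
-- ===== SOURCE A (Python) =====
-- def orderRouters(solution):
--     """
--     Given a solution, puts all the (-1, -1) routers in the end of the list (not needed all the routers).
--     """
--     toLast, newSol = [], []
--
--     for router in solution:
--         if router != (-1, -1):  # the router is present
--             newSol.append(router)
--         else:  # the router is removed
--             toLast.append(router)
--
--     for router in toLast:  # all the removed routers will now be appended to the end of the returned list
--         newSol.append(router)
--
--     return newSol
-- ===== SOURCE B (Python) =====
-- def orderRouters(solution):
--     # stable sort on the boolean key "is a removed router": present routers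
--     # (key False) keep their order first, (-1,-1) routers go to the end.
--     return sorted(solution, key=lambda r: r == (-1, -1))
-- ===== Notes on version B (the rewrite author's own statement) =====
-- stated objective: simpler
-- what changed: Replaces the two-bucket collect-and-append partition with a single stable sort on the boolean key 'router == (-1,-1)', whose stability yields exactly the same order.
import Mathlib
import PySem

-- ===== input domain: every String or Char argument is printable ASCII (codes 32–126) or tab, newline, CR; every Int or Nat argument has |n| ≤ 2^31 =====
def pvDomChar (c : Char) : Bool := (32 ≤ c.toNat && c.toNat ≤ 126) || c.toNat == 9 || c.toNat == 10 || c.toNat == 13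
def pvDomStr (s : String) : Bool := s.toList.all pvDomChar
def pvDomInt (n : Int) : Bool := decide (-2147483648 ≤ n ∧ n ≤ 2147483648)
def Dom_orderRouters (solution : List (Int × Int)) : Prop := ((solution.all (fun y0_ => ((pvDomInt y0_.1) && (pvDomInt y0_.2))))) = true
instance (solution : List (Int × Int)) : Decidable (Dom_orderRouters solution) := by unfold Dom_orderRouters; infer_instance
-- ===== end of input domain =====

-- B replaces A's two-bucket collect-and-append partition by one stable sort on the
-- boolean key "router == (-1,-1)" (simpler: a single library call).

-- ===== PORT A =====
-- two accumulators (toLast, newSol), then a second loop appending toLast to newSol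
def orderRouters (solution : List (Int × Int)) : List (Int × Int) :=
  let st := solution.foldl
    (fun (st : List (Int × Int) × List (Int × Int)) router =>
      if router ≠ ((-1 : Int), (-1 : Int)) then (st.1, st.2 ++ [router])
      else (st.1 ++ [router], st.2))
    ([], [])
  st.1.foldl (fun acc router => acc ++ [router]) st.2

-- ===== PORT B =====
-- sorted(solution, key=lambda r: r == (-1, -1)) : stable sort on a boolean key
def orderRouters_alt (solution : List (Int × Int)) : List (Int × Int) :=
  PySem.List.sorted solution (fun r => decide (r = ((-1 : Int), (-1 : Int)))) false

-- ===== PRECONDITION & SPEC =====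
def Spec_orderRouters (solution : List (Int × Int)) (out : List (Int × Int)) : Prop := out = orderRouters_alt solution
instance (solution : List (Int × Int)) (out : List (Int × Int)) : Decidable (Spec_orderRouters solution out) := by unfold Spec_orderRouters; infer_instance

-- ===== CLAIM (what is proved, stated in full; the proofs are below) =====
def Claim_equal_orderRouters : Prop := ∀ (solution : List (Int × Int)), Dom_orderRouters solution → Spec_orderRouters solution (orderRouters solution)

-- ===== LEMMAS AND PROOFS =====

-- inserting an element whose key is true goes to the very end (true < b never holds)
theorem insertBy_key_true {α : Type} (key : α → Bool) (x : α) (hx : key x = true)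
    (L : List α) :
    PySem.List.insertBy (fun a b => decide (key a < key b)) x L = L ++ [x] := by
  induction L with
  | nil => rfl
  | cons y ys ih =>
      have h : decide (key x < key y) = false := by simp [hx, Bool.lt_iff]
      simp only [PySem.List.insertBy] at ih ⊢
      simp [h, ih]

-- inserting a key-false element into F ++ T (F all false, T all true) lands between them
theorem insertBy_key_false {α : Type} (key : α → Bool) (x : α) (hx : key x = false)
    (F T : List α) (hF : ∀ a ∈ F, key a = false) (hT : ∀ a ∈ T, key a = true) :
    PySem.List.insertBy (fun a b => decide (key a < key b)) x (F ++ T) = F ++ x :: T := by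
  induction F with
  | nil =>
      cases T with
      | nil => rfl
      | cons t ts =>
          have ht : key t = true := hT t (by simp)
          have h : decide (key x < key t) = true := by simp [hx, ht, Bool.lt_iff]
          simp only [List.nil_append, PySem.List.insertBy, h, if_pos]
  | cons f fs ih =>
      have hf : key f = false := hF f (by simp)
      have h : decide (key x < key f) = false := by simp [hx, hf]
      have hF' : ∀ a ∈ fs, key a = false := fun a ha => hF a (List.mem_cons_of_mem _ ha)
      simp only [List.cons_append, PySem.List.insertBy, h]
      simp [ih hF']

-- insertion-sort invariant: with acc = F ++ T partitioned by the boolean key,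
-- folding insertBy yields the stable partition of the remaining input appended
theorem foldl_insertBy_partition {α : Type} (key : α → Bool) (xs : List α) :
    ∀ (F T : List α), (∀ a ∈ F, key a = false) → (∀ a ∈ T, key a = true) →
    xs.foldl (fun acc x => PySem.List.insertBy (fun a b => decide (key a < key b)) x acc) (F ++ T)
      = (F ++ xs.filter (fun x => !key x)) ++ (T ++ xs.filter key) := by
  induction xs with
  | nil => intro F T _ _; simp
  | cons x xs ih =>
      intro F T hF hT
      cases hx : key x with
      | true =>
          have hstep : PySem.List.insertBy (fun a b => decide (key a < key b)) x (F ++ T)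
              = F ++ (T ++ [x]) := by
            rw [insertBy_key_true key x hx, List.append_assoc]
          have hT' : ∀ a ∈ T ++ [x], key a = true := by
            intro a ha
            rcases List.mem_append.1 ha with h | h
            · exact hT a h
            · simp at h; simpa [h] using hx
          simp only [List.foldl_cons, hstep, ih F (T ++ [x]) hF hT']
          simp [hx]
      | false =>
          have hstep : PySem.List.insertBy (fun a b => decide (key a < key b)) x (F ++ T)
              = (F ++ [x]) ++ T := by
            rw [insertBy_key_false key x hx F T hF hT]; simp
          have hF' : ∀ a ∈ F ++ [x], key a = false := by
            intro a ha
            rcases List.mem_append.1 ha with h | h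
            · exact hF a h
            · simp at h; simpa [h] using hx
          simp only [List.foldl_cons, hstep, ih (F ++ [x]) T hF' hT]
          simp [hx]

-- B computes the stable partition: key-false elements first, key-true last
theorem alt_eq_partition (solution : List (Int × Int)) :
    orderRouters_alt solution
      = solution.filter (fun r => !decide (r = ((-1 : Int), (-1 : Int))))
        ++ solution.filter (fun r => decide (r = ((-1 : Int), (-1 : Int)))) := by
  unfold orderRouters_alt
  rw [PySem.List.sorted_eq_foldl_insertBy]
  have := foldl_insertBy_partition (fun r => decide (r = ((-1 : Int), (-1 : Int))))
    solution [] [] (by intro a h; simp at h) (by intro a h; simp at h)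
  simpa using this

-- A's second loop is list append
theorem foldl_append_eq {α : Type} (ys : List α) :
    ∀ acc : List α, ys.foldl (fun acc r => acc ++ [r]) acc = acc ++ ys := by
  induction ys with
  | nil => intro acc; simp
  | cons y ys ih => intro acc; simp [List.foldl_cons, ih, List.append_assoc]

-- A's first loop builds the two filters
theorem foldl_partition_eq (xs : List (Int × Int)) :
    ∀ (tl ns : List (Int × Int)),
    xs.foldl
      (fun (st : List (Int × Int) × List (Int × Int)) router =>
        if router ≠ ((-1 : Int), (-1 : Int)) then (st.1, st.2 ++ [router])
        else (st.1 ++ [router], st.2)) (tl, ns)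
      = (tl ++ xs.filter (fun r => decide (r = ((-1 : Int), (-1 : Int)))),
         ns ++ xs.filter (fun r => !decide (r = ((-1 : Int), (-1 : Int))))) := by
  induction xs with
  | nil => intro tl ns; simp
  | cons x xs ih =>
      intro tl ns
      rw [List.foldl_cons]
      by_cases hx : x = ((-1 : Int), (-1 : Int))
      · rw [if_neg (by simp [hx]), ih]
        simp [hx]
      · rw [if_pos (by simp [hx]), ih]
        simp [hx]

-- ===== VERDICT (by name: the statement is the Claim_ definition above) =====
theorem orderRouters_spec : Claim_equal_orderRouters := by
  intro solution _
  unfold Spec_orderRouters orderRouters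
  rw [alt_eq_partition]
  simp only [foldl_partition_eq solution [] []]
  rw [foldl_append_eq]
  simp
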